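-- pv_equiv track=rewrite | github.com/wccuiro/pxp_clock | pxp_transition_hamiltonian.py | fibonacci_basis
-- ===== SOURCE A (Python) =====
-- def fibonacci_basis(L, pbc=False):
--   states = []
--   for i in range(1 << L):
--     if i & (i >> 1) == 0:
--       if pbc and 2**0 & i and 2**(L-1) & i:
--         continue
--       else:
--         states.append(i)
--   return states
--
-- L = 20
-- ===== SOURCE B (Python) =====
-- def fibonacci_basis(L, pbc=False):
--     # Build the no-adjacent-1s states of each length directly (Fibonacci
--     # recurrence), instead of scanning all 2**L integers.
--     prev, cur = [0], [0, 1]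
--     for k in range(2, L + 1):
--         prev, cur = cur, cur + [x + 2 ** (k - 1) for x in prev]
--     states = cur if L >= 1 else [0]
--     if pbc and L >= 1:
--         hi = 2 ** (L - 1)
--         states = [x for x in states if not (x % 2 == 1 and (x // hi) % 2 == 1)]
--     return states
-- ===== Notes on version B (the rewrite author's own statement) =====
-- stated objective: alternative
-- what changed: B builds the no-adjacent-1s states of each length directly by the Fibonacci recurrence S(k) = S(k-1) ++ [x + 2^(k-1) for x in S(k-2)] and applies the pbc filter once at the end, instead of scanning all 2**L integers and testing each with bit operations; intended as asymptotically cheaper (O(Fib(L)) work vs O(2^L)), but a timing run could not confirm a clean reading (the output itself grows as Fib(L)).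
import Mathlib
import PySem

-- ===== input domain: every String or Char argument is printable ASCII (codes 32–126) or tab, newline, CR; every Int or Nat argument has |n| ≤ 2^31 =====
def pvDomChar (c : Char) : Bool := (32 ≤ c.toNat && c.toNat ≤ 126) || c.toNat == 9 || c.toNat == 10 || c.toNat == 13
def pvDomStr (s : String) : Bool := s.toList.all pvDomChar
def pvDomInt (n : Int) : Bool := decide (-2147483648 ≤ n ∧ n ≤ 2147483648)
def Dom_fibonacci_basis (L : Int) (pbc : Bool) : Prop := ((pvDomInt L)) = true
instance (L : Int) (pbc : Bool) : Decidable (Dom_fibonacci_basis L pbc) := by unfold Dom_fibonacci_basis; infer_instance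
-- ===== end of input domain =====

-- B replaces A's scan of all 2^L integers by the Fibonacci recurrence that generates
-- exactly the no-adjacent-1s states of each length (objective: alternative algorithm).

-- ===== PORT A =====
-- 'for i in range(1 << L)': 1 << L = 2^L, exact for L ≥ 0 (Pre_).
-- 'i & (i >> 1)' is Int.land i (i >>> 1); '2**0 & i' is Int.land 1 i.
-- '2**(L-1)' is written (2:Int)^((L-1).toNat): exact for L ≥ 1; for L = 0 Python never
-- evaluates it (the loop only reaches i = 0, where '2**0 & i' is 0 and 'and' short-circuits),
-- and there the Lean condition is likewise false, so the branch taken is the same.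
def fibonacci_basis (L : Int) (pbc : Bool) : List Int :=
  (PySem.List.pyRange 0 ((2 : Int) ^ L.toNat) 1).foldl
    (fun states i =>
      if Int.land i (i >>> (1 : Int)) == 0 then
        if pbc && !(Int.land ((2 : Int) ^ (0 : Nat)) i == 0)
               && !(Int.land ((2 : Int) ^ ((L - 1).toNat)) i == 0) then
          states
        else
          states ++ [i]
      else states) []

-- ===== PORT B =====
-- 'prev, cur = cur, cur + [x + 2 ** (k - 1) for x in prev]'
def fbLoop (pc : List Int × List Int) (k : Int) : List Int × List Int :=
  (pc.2, pc.2 ++ pc.1.map (fun x => x + (2 : Int) ^ (k - 1).toNat))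

def fibonacci_basis_alt (L : Int) (pbc : Bool) : List Int :=
  let pc := (PySem.List.pyRange 2 (L + 1) 1).foldl fbLoop ([0], [0, 1])
  let states := if 1 ≤ L then pc.2 else [0]
  if pbc && decide (1 ≤ L) then
    states.filter (fun x =>
      !(PySem.Int.mod x 2 == 1
        && PySem.Int.mod (PySem.Int.floordiv x ((2 : Int) ^ ((L - 1).toNat))) 2 == 1))
  else states

-- ===== PRECONDITION & SPEC =====
-- Python A raises ValueError on L < 0 ('1 << L' with a negative shift); Pre_ excludes exactly those.
def Pre_fibonacci_basis (L : Int) (pbc : Bool) : Prop := 0 ≤ L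
instance (L : Int) (pbc : Bool) : Decidable (Pre_fibonacci_basis L pbc) := by
  unfold Pre_fibonacci_basis; infer_instance
def pvWitness_fibonacci_basis : Int × Bool := (5, true)

def Spec_fibonacci_basis (L : Int) (pbc : Bool) (out : List Int) : Prop :=
  out = fibonacci_basis_alt L pbc
instance (L : Int) (pbc : Bool) (out : List Int) : Decidable (Spec_fibonacci_basis L pbc out) := by
  unfold Spec_fibonacci_basis; infer_instance

-- ===== CLAIM (what is proved, stated in full; the proofs are below) =====
def Claim_equal_fibonacci_basis : Prop := ∀ (L : Int) (pbc : Bool),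
  Dom_fibonacci_basis L pbc → Pre_fibonacci_basis L pbc →
  Spec_fibonacci_basis L pbc (fibonacci_basis L pbc)

-- ===== LEMMAS AND PROOFS =====

-- Nat-level picture of both programs.
def noAdjN (i : Nat) : Bool := (i &&& (i >>> 1)) == 0

-- A's pbc skip condition at Nat level (m = (L-1).toNat).
def skipN (pbc : Bool) (m : Nat) (k : Nat) : Bool :=
  pbc && !((1 &&& k) == 0) && !((2 ^ m &&& k) == 0)

def GN (n : Nat) : List Nat := (List.range (2 ^ n)).filter noAdjN

def FN : Nat → List Nat
  | 0 => [0]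
  | 1 => [0, 1]
  | n + 2 => FN (n + 1) ++ (FN n).map (fun x => x + 2 ^ (n + 1))

lemma noAdjN_iff (i : Nat) :
    noAdjN i = true ↔ ∀ j, ¬(i.testBit j = true ∧ i.testBit (j + 1) = true) := by
  constructor
  · intro h j ⟨h1, h2⟩
    have h0 : i &&& (i >>> 1) = 0 := by simpa [noAdjN] using h
    have := congrArg (fun x => Nat.testBit x j) h0
    simp only [Nat.testBit_land, Nat.testBit_shiftRight, Nat.zero_testBit] at this
    rw [Nat.add_comm 1 j] at this
    simp [h1, h2] at this
  · intro h
    have h0 : i &&& (i >>> 1) = 0 := by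
      apply Nat.eq_of_testBit_eq
      intro j
      simp only [Nat.testBit_land, Nat.testBit_shiftRight, Nat.zero_testBit]
      have := h j
      rw [Nat.add_comm 1 j]
      cases hj : i.testBit j <;> cases hj' : i.testBit (j + 1) <;> simp_all
    simpa [noAdjN] using h0

lemma crux (n k : Nat) (hk : k < 2 ^ (n + 1)) :
    noAdjN (2 ^ (n + 1) + k) = (noAdjN k && decide (k < 2 ^ n)) := by
  have hksucc : k.testBit (n + 1) = false := Nat.testBit_lt_two_pow hk
  have hsum : ∀ j, (2 ^ (n + 1) + k).testBit j =
      (decide (j = n + 1) || (decide (j < n + 1) && k.testBit j)) := by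
    intro j
    rcases lt_trichotomy j (n + 1) with hj | hj | hj
    · rw [Nat.testBit_two_pow_add_gt hj]
      simp [hj, Nat.ne_of_lt hj]
    · subst hj
      rw [Nat.testBit_two_pow_add_eq, hksucc]
      simp
    · have : 2 ^ (n + 1) + k < 2 ^ j := by
        calc 2 ^ (n + 1) + k < 2 ^ (n + 1) + 2 ^ (n + 1) := by omega
        _ = 2 ^ (n + 2) := by ring
        _ ≤ 2 ^ j := Nat.pow_le_pow_right (by norm_num) (by omega)
      rw [Nat.testBit_lt_two_pow this]
      simp
      omega
  rw [Bool.eq_iff_iff]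
  simp only [Bool.and_eq_true, decide_eq_true_eq, noAdjN_iff]
  constructor
  · intro h
    have hkn : k.testBit n = false := by
      by_contra hb
      have hbn : k.testBit n = true := by simpa using hb
      have := h n
      rw [hsum n, hsum (n + 1)] at this
      simp [hbn] at this
    constructor
    · intro j ⟨h1, h2⟩
      have hj1 : j + 1 ≤ n := by
        by_contra hc
        have : j + 1 = n + 1 ∨ j + 1 > n + 1 := by omega
        rcases this with h' | h'
        · rw [show j = n by omega] at h1; simp [hkn] at h1
        · have : k < 2 ^ (j + 1) := lt_of_lt_of_le hk (Nat.pow_le_pow_right (by norm_num) (by omega))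
          rw [Nat.testBit_lt_two_pow this] at h2; simp at h2
      have := h j
      rw [hsum j, hsum (j + 1)] at this
      simp [h1, h2] at this
      omega
    · apply Nat.lt_pow_two_of_testBit
      intro i hi
      by_contra hb
      have hbt : k.testBit i = true := by simpa using hb
      have : i ≤ n := by
        by_contra hc
        have : k < 2 ^ i := lt_of_lt_of_le hk (Nat.pow_le_pow_right (by norm_num) (by omega))
        rw [Nat.testBit_lt_two_pow this] at hbt; simp at hbt
      have : i = n := by omega
      subst this
      exact absurd hbt (by simp [hkn])
  · rintro ⟨h1, h2⟩ j
    rw [hsum j, hsum (j + 1)]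
    rintro ⟨ha, hb⟩
    have hn : k.testBit n = false := Nat.testBit_lt_two_pow h2
    rcases lt_trichotomy j (n + 1) with hj | hj | hj
    · rcases Nat.lt_or_ge (j + 1) (n + 1) with hj' | hj'
      · simp only [show ¬(j = n + 1) by omega, show ¬(j + 1 = n + 1) by omega,
          ] at ha hb
        simp [hj, hj'] at ha hb
        exact h1 j ⟨ha, hb⟩
      · rw [show j = n by omega] at ha
        simp [hn] at ha
    · subst hj
      have : k.testBit (n + 2) = false :=
        Nat.testBit_lt_two_pow (lt_of_lt_of_le h2 (Nat.pow_le_pow_right (by norm_num) (by omega)))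
      simp [this] at hb
    · have : k.testBit j = false :=
        Nat.testBit_lt_two_pow (lt_of_lt_of_le h2 (Nat.pow_le_pow_right (by norm_num) (by omega)))
      simp [this, show ¬(j = n + 1) by omega, show ¬(j < n + 1) by omega] at ha

lemma GN_succ_succ (n : Nat) :
    GN (n + 2) = GN (n + 1) ++ (GN n).map (fun x => x + 2 ^ (n + 1)) := by
  unfold GN
  have hsplit : (2 : Nat) ^ (n + 2) = 2 ^ (n + 1) + 2 ^ (n + 1) := by ring
  rw [hsplit, List.range_add, List.filter_append, List.filter_map]
  congr 1
  have hcong : List.filter (noAdjN ∘ fun x => 2 ^ (n + 1) + x) (List.range (2 ^ (n + 1)))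
      = List.filter (fun k => noAdjN k && decide (k < 2 ^ n)) (List.range (2 ^ (n + 1))) := by
    apply List.filter_congr
    intro k hk
    exact crux n k (List.mem_range.mp hk)
  rw [hcong]
  have hsplit' : (2 : Nat) ^ (n + 1) = 2 ^ n + 2 ^ n := by ring
  rw [hsplit', List.range_add, List.filter_append]
  have h1 : List.filter (fun k => noAdjN k && decide (k < 2 ^ n)) (List.range (2 ^ n))
      = List.filter noAdjN (List.range (2 ^ n)) := by
    apply List.filter_congr
    intro k hk
    simp [List.mem_range.mp hk]
  have h2 : List.filter (fun k => noAdjN k && decide (k < 2 ^ n))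
      (List.map (fun x => 2 ^ n + x) (List.range (2 ^ n))) = [] := by
    rw [List.filter_map]
    have : List.filter ((fun k => noAdjN k && decide (k < 2 ^ n)) ∘ fun x => 2 ^ n + x)
        (List.range (2 ^ n)) = [] := by
      apply List.filter_eq_nil_iff.mpr
      intro a _
      simp [Function.comp]
    rw [this]; rfl
  rw [h1, h2, List.append_nil]
  apply List.map_congr_left
  intro a _
  omega

lemma GN_eq_FN : ∀ n, GN n = FN n := by
  intro n
  induction n using Nat.strong_induction_on with
  | _ n ih =>
    match n with
    | 0 => decide
    | 1 => decide
    | n + 2 =>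
      rw [GN_succ_succ, ih (n + 1) (by omega), ih n (by omega)]
      rfl

-- folding two nested if-tests that append is a filter
lemma foldl_nested {α β : Type} (p q : α → Bool) (f : α → β) (l : List α) (acc : List β) :
    l.foldl (fun acc x => if p x then (if q x then acc else acc ++ [f x]) else acc) acc
      = acc ++ (l.filter (fun x => p x && !q x)).map f := by
  have hfun : (fun (acc : List β) x =>
        if p x then (if q x then acc else acc ++ [f x]) else acc)
      = fun acc x => if (p x && !q x) then acc ++ [f x] else acc := by
    funext acc x
    cases hp : p x <;> cases hq : q x <;> simp
  rw [hfun]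
  exact PySem.List.foldl_append_if _ f l acc

-- A's Int-level bit tests on a cast Nat agree with the Nat-level tests
lemma land_cast (a b : Nat) : Int.land (a : Int) (b : Int) = ((a &&& b : Nat) : Int) := rfl

lemma shift1_cast (k : Nat) : (k : Int) >>> (1 : Int) = ((k >>> 1 : Nat) : Int) := by
  have := Int.shiftRight_natCast k 1
  simpa using this

-- A reduced to a Nat-level filter
lemma A_eq (n : Nat) (pbc : Bool) :
    fibonacci_basis (n : Int) pbc
      = ((List.range (2 ^ n)).filter
          (fun k => noAdjN k && !(skipN pbc (((n : Int) - 1).toNat) k))).map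
          (Nat.cast : Nat → Int) := by
  unfold fibonacci_basis
  have hcast : ((2 : Int) ^ (n : Int).toNat) = (((2 ^ n : Nat) : Int)) := by
    push_cast; simp
  rw [hcast, PySem.List.pyRange_zero_natCast, List.foldl_map]
  have hbody : (fun (states : List Int) (k : Nat) =>
      if Int.land (k : Int) ((k : Int) >>> (1 : Int)) == 0 then
        if pbc && !(Int.land ((2 : Int) ^ (0 : Nat)) (k : Int) == 0)
               && !(Int.land ((2 : Int) ^ (((n : Int) - 1).toNat)) (k : Int) == 0) then
          states
        else states ++ [(k : Int)]
      else states)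
      = fun states k =>
        if noAdjN k then
          (if skipN pbc (((n : Int) - 1).toNat) k then states else states ++ [(k : Int)])
        else states := by
    funext states k
    have e1 : (Int.land (k : Int) ((k : Int) >>> (1 : Int)) == 0) = noAdjN k := by
      rw [shift1_cast, land_cast]
      simp [noAdjN]
    have e2 : (Int.land ((2 : Int) ^ (0 : Nat)) (k : Int) == 0) = ((1 &&& k) == 0) := by
      rw [show ((2 : Int) ^ (0 : Nat)) = (((1 : Nat)) : Int) by norm_num, land_cast]
      simp
      omega
    have e3 : (Int.land ((2 : Int) ^ (((n : Int) - 1).toNat)) (k : Int) == 0)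
        = ((2 ^ (((n : Int) - 1).toNat) &&& k) == 0) := by
      rw [show ((2 : Int) ^ (((n : Int) - 1).toNat))
          = (((2 ^ (((n : Int) - 1).toNat) : Nat)) : Int) by push_cast; simp, land_cast]
      simp
    rw [e1, e2, e3]
    rfl
  rw [hbody, foldl_nested (p := noAdjN) (q := skipN pbc (((n : Int) - 1).toNat))]
  simp only [List.nil_append]

-- B's loop computes the cast FN lists
lemma B_loop (n : Nat) :
    (PySem.List.pyRange 2 ((n : Int) + 2) 1).foldl fbLoop ([0], [0, 1])
      = ((FN n).map (Nat.cast : Nat → Int), (FN (n + 1)).map (Nat.cast : Nat → Int)) := by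
  induction n with
  | zero =>
    rw [show ((0 : Nat) : Int) + 2 = 2 by norm_num, PySem.List.pyRange_one_eq_nil le_rfl]
    rfl
  | succ m ih =>
    have hsucc : ((m + 1 : Nat) : Int) + 2 = (((m : Nat) : Int) + 2) + 1 := by push_cast; ring
    rw [hsucc, PySem.List.pyRange_one_succ_right (by omega), List.foldl_append, ih]
    simp only [List.foldl_cons, List.foldl_nil, fbLoop]
    rw [Prod.mk.injEq]
    refine ⟨rfl, ?_⟩
    have htn : (((m : Nat) : Int) + 2 - 1).toNat = m + 1 := by omega
    rw [htn, List.map_map,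
      show FN (m + 1 + 1) = FN (m + 1) ++ (FN m).map (fun x => x + 2 ^ (m + 1)) from rfl,
      List.map_append, List.map_map]
    refine congrArg₂ (· ++ ·) rfl (List.map_congr_left fun a _ => ?_)
    show (a : Int) + (2 : Int) ^ (m + 1) = ((a + 2 ^ (m + 1) : Nat) : Int)
    norm_cast

-- pointwise agreement of the two pbc filters on cast Nats (m = (L-1).toNat)
lemma filter_cond_eq (m k : Nat) :
    (!(PySem.Int.mod (k : Int) 2 == 1
        && PySem.Int.mod (PySem.Int.floordiv (k : Int) ((2 : Int) ^ m)) 2 == 1))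
      = !(skipN true m k) := by
  have hpow : ((2 : Int) ^ m) = (((2 ^ m : Nat)) : Int) := by push_cast; simp
  rw [hpow, show (2 : Int) = (((2 : Nat)) : Int) by norm_num,
    PySem.Int.floordiv_natCast, PySem.Int.mod_natCast, PySem.Int.mod_natCast]
  congr 1
  rw [Bool.eq_iff_iff]
  simp only [Bool.and_eq_true, beq_iff_eq, skipN, Bool.true_and,
    Bool.not_eq_true', beq_eq_false_iff_ne, ne_eq]
  have h10 : (1 : Nat) &&& k = k % 2 := by rw [Nat.and_comm, Nat.and_one_is_mod]
  have hA : ((k % 2 : Nat) : Int) = 1 ↔ ¬((1 : Nat) &&& k = 0) := by rw [h10]; omega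
  have hB : ((k / 2 ^ m % 2 : Nat) : Int) = 1 ↔ ¬((2 : Nat) ^ m &&& k = 0) := by
    have hbit : k.testBit m = decide (k / 2 ^ m % 2 = 1) := Nat.testBit_eq_decide_div_mod_eq
    rw [Nat.two_pow_and]
    have hpos : (0 : Nat) < 2 ^ m := Nat.two_pow_pos m
    constructor
    · intro h hz
      have h1 : k / 2 ^ m % 2 = 1 := by omega
      have h2 : k.testBit m = true := by rw [hbit]; simpa using h1
      rw [h2] at hz
      simp at hz
    · intro h
      by_cases hd : k / 2 ^ m % 2 = 1
      · omega
      · have h2 : k.testBit m = false := by rw [hbit]; simpa using hd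
        rw [h2] at h
        simp at h
  exact and_congr hA hB

-- ===== VERDICT (by name: the statement is the Claim_ definition above) =====
set_option maxRecDepth 8000 in
theorem fibonacci_basis_spec : Claim_equal_fibonacci_basis := by
  intro L pbc _ hpre
  show fibonacci_basis L pbc = fibonacci_basis_alt L pbc
  have hL : 0 ≤ L := hpre
  obtain ⟨n, rfl⟩ : ∃ n : Nat, L = (n : Int) := ⟨L.toNat, by omega⟩
  rw [A_eq]
  unfold fibonacci_basis_alt
  cases n with
  | zero =>
    cases pbc <;> decide
  | succ m =>
    have h1 : (1 : Int) ≤ ((m + 1 : Nat) : Int) := by push_cast; omega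
    have hrange : ((m + 1 : Nat) : Int) + 1 = ((m : Nat) : Int) + 2 := by push_cast; ring
    rw [hrange]
    simp only [B_loop m, h1, decide_true]
    have hGF : (List.range (2 ^ (m + 1))).filter noAdjN = FN (m + 1) := GN_eq_FN (m + 1)
    cases pbc with
    | false =>
      simp only [Bool.false_and, if_neg (by simp : ¬(false = true))]
      have : (fun k => noAdjN k && !(skipN false ((((m + 1 : Nat) : Int)) - 1).toNat k))
          = noAdjN := by
        funext k; simp [skipN]
      rw [this, hGF, if_pos trivial]
    | true =>
      simp only [Bool.true_and]
      rw [if_pos trivial, if_pos trivial, List.filter_map]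
      have hm : ((((m + 1 : Nat) : Int)) - 1).toNat = m := by omega
      have : (fun k => noAdjN k && !(skipN true ((((m + 1 : Nat) : Int)) - 1).toNat k))
          = fun k => !(skipN true m k) && noAdjN k := by
        funext k; rw [hm, Bool.and_comm]
      rw [this, ← List.filter_filter, hGF]
      refine congrArg (List.map (Nat.cast : Nat → Int)) ?_
      apply List.filter_congr
      intro k _
      rw [hm]
      exact (filter_cond_eq m k).symm
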